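-- pv_equiv track=rewrite | github.com/PyVRP/VRPLIB | cvrplib/read/parse_vrplib.py | from_triangular
-- ===== SOURCE A (Python) =====
-- from itertools import combinations
-- from typing import Any, Dict, List
--
-- def from_triangular(triangular: List[List[int]]) -> List[List[int]]:
--     """
--     Compute a full distances matrix from a triangular matrix.
--     """
--     n = len(triangular) + 1
--     distances = [[0 for _ in range(n)] for _ in range(n)]
--
--     for j, i in combinations(range(n), r=2):
--         t_ij = triangular[i - 1][j]
--         distances[i][j] = t_ij
--         distances[j][i] = t_ij
--
--     return distances
-- ===== SOURCE B (Python) =====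
-- def from_triangular(triangular):
--     n = len(triangular) + 1
--     return [
--         [0 if i == j else triangular[max(i, j) - 1][min(i, j)] for j in range(n)]
--         for i in range(n)
--     ]
-- ===== Notes on version B (the rewrite author's own statement) =====
-- stated objective: simpler
-- what changed: B builds the full n-by-n matrix in a single nested comprehension, computing each cell independently as 0 on the diagonal and triangular[max(i,j)-1][min(i,j)] off it, instead of A's zero-matrix initialisation followed by a pair-enumeration loop that writes each value twice (mirror writes).
import Mathlib
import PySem

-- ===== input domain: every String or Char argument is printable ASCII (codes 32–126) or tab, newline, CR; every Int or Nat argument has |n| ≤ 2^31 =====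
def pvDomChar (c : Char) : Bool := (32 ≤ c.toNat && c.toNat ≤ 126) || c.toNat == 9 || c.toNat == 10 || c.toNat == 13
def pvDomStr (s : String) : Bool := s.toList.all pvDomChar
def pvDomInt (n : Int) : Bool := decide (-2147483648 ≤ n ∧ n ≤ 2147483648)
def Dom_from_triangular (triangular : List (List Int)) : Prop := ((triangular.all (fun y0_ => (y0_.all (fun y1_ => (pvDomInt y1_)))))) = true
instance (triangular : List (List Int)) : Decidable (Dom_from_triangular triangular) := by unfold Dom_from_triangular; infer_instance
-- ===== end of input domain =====

-- B builds each cell of the full matrix independently in one nested comprehension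
-- (0 on the diagonal, triangular[max i j - 1][min i j] off it) instead of A's
-- zero matrix plus pair-enumeration loop with mirrored writes; objective: simpler.

-- ===== PORT A =====
-- combinations(range n, 2): pairs (j, i) with j < i < n, in lexicographic order
def pvPairs (n : Nat) : List (Nat × Nat) :=
  (List.range n).flatMap (fun j => (List.range' (j + 1) (n - (j + 1))).map (fun i => (j, i)))

-- Python list assignment m[i][j] = v (indices are in range wherever A performs it)
def pvUpd (m : List (List Int)) (i j : Nat) (v : Int) : List (List Int) :=
  m.set i ((m.getD i []).set j v)

-- one iteration of A's loop body for the pair (j, i)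
def pvStep (tri : List (List Int)) (d : List (List Int)) (p : Nat × Nat) : List (List Int) :=
  let t := (tri.getD (p.2 - 1) []).getD p.1 0
  pvUpd (pvUpd d p.2 p.1 t) p.1 p.2 t

def from_triangular (triangular : List (List Int)) : List (List Int) :=
  let n := triangular.length + 1
  let distances := (List.range n).map (fun _ => (List.range n).map (fun _ => (0 : Int)))
  (pvPairs n).foldl (pvStep triangular) distances

-- ===== PORT B =====
def from_triangular_alt (triangular : List (List Int)) : List (List Int) :=
  let n := triangular.length + 1
  (List.range n).map (fun i => (List.range n).map (fun j =>
    if i = j then (0 : Int) else (triangular.getD (max i j - 1) []).getD (min i j) 0))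

-- ===== PRECONDITION & SPEC =====
-- Pre_ excludes exactly the inputs where Python A raises IndexError: row k must
-- have at least k+1 entries (A reads triangular[i-1][j] for every j < i).
def Pre_from_triangular (triangular : List (List Int)) : Prop :=
  ∀ k < triangular.length, k + 1 ≤ (triangular.getD k []).length
instance (triangular : List (List Int)) : Decidable (Pre_from_triangular triangular) := by
  unfold Pre_from_triangular; infer_instance

def pvWitness_from_triangular : List (List Int) := [[3], [1, 2]]

def Spec_from_triangular (triangular : List (List Int)) (out : List (List Int)) : Prop := out = from_triangular_alt triangular
instance (triangular : List (List Int)) (out : List (List Int)) : Decidable (Spec_from_triangular triangular out) := by unfold Spec_from_triangular; infer_instance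

-- ===== CLAIM (what is proved, stated in full; the proofs are below) =====
def Claim_equal_from_triangular : Prop := ∀ (triangular : List (List Int)), Dom_from_triangular triangular → Pre_from_triangular triangular → Spec_from_triangular triangular (from_triangular triangular)

-- ===== LEMMAS AND PROOFS =====

def pvShape (n : Nat) (m : List (List Int)) : Prop :=
  m.length = n ∧ ∀ r ∈ m, r.length = n

def pvEntry (m : List (List Int)) (a b : Nat) : Int := (m.getD a []).getD b 0

def pvT (tri : List (List Int)) (a b : Nat) : Int :=
  (tri.getD (max a b - 1) []).getD (min a b) 0

theorem pvShape_upd {n : Nat} {m : List (List Int)} (h : pvShape n m) (i j : Nat) (v : Int) :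
    pvShape n (pvUpd m i j v) := by
  obtain ⟨hl, hr⟩ := h
  refine ⟨by simp [pvUpd, hl], ?_⟩
  intro r hrm
  by_cases hi : i < m.length
  · rcases List.mem_or_eq_of_mem_set hrm with h1 | h2
    · exact hr r h1
    · subst h2
      rw [List.length_set, List.getD_eq_getElem _ _ hi]
      exact hr _ (List.getElem_mem hi)
  · rw [pvUpd, List.set_eq_of_length_le (by omega)] at hrm
    exact hr r hrm

theorem pvEntry_upd {n : Nat} {m : List (List Int)} (h : pvShape n m)
    {i j : Nat} (hi : i < n) (hj : j < n) (v : Int) (a b : Nat) :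
    pvEntry (pvUpd m i j v) a b = if a = i ∧ b = j then v else pvEntry m a b := by
  obtain ⟨hl, hr⟩ := h
  have him : i < m.length := by omega
  have hrow : (m.getD i []).length = n := by
    rw [List.getD_eq_getElem _ _ him]; exact hr _ (List.getElem_mem him)
  by_cases ha : a = i
  · subst ha
    have hget : (pvUpd m a j v).getD a [] = (m.getD a []).set j v := by
      rw [List.getD_eq_getElem _ _ (by simpa [pvUpd] using him)]
      simp [pvUpd]
    rw [pvEntry, hget]
    by_cases hb : b = j
    · subst hb
      rw [List.getD_eq_getElem _ _ (by rw [List.length_set]; omega)]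
      simp [List.getElem_set_self]
    · simp [pvEntry, hb, List.getD, List.getElem?_set_ne (by omega : j ≠ b)]
  · have hget : (pvUpd m i j v).getD a [] = m.getD a [] := by
      simp [pvUpd, List.getD, List.getElem?_set_ne (fun hh => ha hh.symm)]
    rw [if_neg (fun hh => ha hh.1), pvEntry, pvEntry, hget]

theorem pvShape_step {n : Nat} (tri : List (List Int)) {m : List (List Int)}
    (h : pvShape n m) (p : Nat × Nat) : pvShape n (pvStep tri m p) :=
  pvShape_upd (pvShape_upd h _ _ _) _ _ _

theorem pvShape_fold {n : Nat} (tri : List (List Int)) (L : List (Nat × Nat))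
    {m : List (List Int)} (h : pvShape n m) : pvShape n (L.foldl (pvStep tri) m) := by
  induction L generalizing m with
  | nil => exact h
  | cons p L ih => exact ih (pvShape_step tri h p)

theorem pvEntry_fold {n : Nat} (tri : List (List Int)) (L : List (Nat × Nat))
    (m : List (List Int)) (h : pvShape n m)
    (hL : ∀ p ∈ L, p.1 < p.2 ∧ p.2 < n) (a b : Nat) :
    pvEntry (L.foldl (pvStep tri) m) a b =
      if (min a b, max a b) ∈ L then pvT tri a b else pvEntry m a b := by
  induction L generalizing m with
  | nil => simp
  | cons p L ih =>
    obtain ⟨hp1, hp2⟩ := hL p List.mem_cons_self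
    rw [List.foldl_cons, ih _ (pvShape_step tri h p) (fun q hq => hL q (List.mem_cons_of_mem _ hq))]
    have hT : ∀ (hd : (a = p.1 ∧ b = p.2) ∨ (a = p.2 ∧ b = p.1)),
        pvT tri a b = (tri.getD (p.2 - 1) []).getD p.1 0 := by
      intro hd
      have h1 : min a b = p.1 := by omega
      have h2 : max a b = p.2 := by omega
      rw [pvT, h1, h2]
    have hstep : pvEntry (pvStep tri m p) a b =
        if (a = p.1 ∧ b = p.2) ∨ (a = p.2 ∧ b = p.1) then pvT tri a b else pvEntry m a b := by
      simp only [pvStep]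
      rw [pvEntry_upd (pvShape_upd h _ _ _) (show p.1 < n by omega) hp2]
      rw [pvEntry_upd h hp2 (show p.1 < n by omega)]
      by_cases h1 : a = p.1 ∧ b = p.2
      · rw [if_pos h1, if_pos (Or.inl h1), hT (Or.inl h1)]
      · rw [if_neg h1]
        by_cases h2 : a = p.2 ∧ b = p.1
        · rw [if_pos h2, if_pos (Or.inr h2), hT (Or.inr h2)]
        · rw [if_neg h2, if_neg (by tauto)]
    rw [hstep]
    have hiff : ((min a b, max a b) = p) ↔ ((a = p.1 ∧ b = p.2) ∨ (a = p.2 ∧ b = p.1)) := by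
      obtain ⟨p1, p2⟩ := p
      simp only [Prod.mk.injEq] at *
      omega
    simp only [List.mem_cons, hiff]
    by_cases hmem : (min a b, max a b) ∈ L <;> simp [hmem]

theorem pvPairs_mem (n x y : Nat) : (x, y) ∈ pvPairs n ↔ x < y ∧ y < n := by
  simp only [pvPairs, List.mem_flatMap, List.mem_map, List.mem_range]
  constructor
  · rintro ⟨j, hj, i, hi, heq⟩
    rw [List.mem_range'_1] at hi
    cases heq
    omega
  · rintro ⟨hxy, hyn⟩
    exact ⟨x, by omega, y, by rw [List.mem_range'_1]; omega, rfl⟩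

theorem pvMem_pairs {n a b : Nat} (ha : a < n) (hb : b < n) :
    (min a b, max a b) ∈ pvPairs n ↔ a ≠ b := by
  rw [pvPairs_mem]
  omega

-- ===== VERDICT (by name: the statement is the Claim_ definition above) =====
theorem from_triangular_spec : Claim_equal_from_triangular := by
  intro tri _ _
  unfold Spec_from_triangular
  simp only [from_triangular, from_triangular_alt]
  set n := tri.length + 1 with hn
  set zeros : List (List Int) := (List.range n).map (fun _ => (List.range n).map (fun _ => (0 : Int))) with hz
  have hzero : pvShape n zeros := by
    constructor
    · simp [hz]
    · intro r hr
      simp [hz] at hr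
      obtain ⟨_, _, rfl⟩ := hr
      simp
  have hpairs : ∀ p ∈ pvPairs n, p.1 < p.2 ∧ p.2 < n := by
    intro p hp
    obtain ⟨p1, p2⟩ := p
    rw [pvPairs_mem] at hp
    exact hp
  have hshape := pvShape_fold tri (pvPairs n) hzero
  apply List.ext_getElem
  · rw [hshape.1]; simp
  intro a h1 h2
  have ha : a < n := by rw [← hshape.1]; exact h1
  apply List.ext_getElem
  · rw [hshape.2 _ (List.getElem_mem h1)]
    simp [List.getElem_map, List.getElem_range]
  intro b hb1 hb2
  have hbn : b < n := by
    rw [← hshape.2 _ (List.getElem_mem h1)]; exact hb1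
  have hLHS : ((pvPairs n).foldl (pvStep tri) zeros)[a][b] =
      pvEntry ((pvPairs n).foldl (pvStep tri) zeros) a b := by
    rw [pvEntry, List.getD_eq_getElem _ _ h1, List.getD_eq_getElem _ _ hb1]
  rw [hLHS, pvEntry_fold tri (pvPairs n) zeros hzero hpairs a b]
  have hzab : pvEntry zeros a b = 0 := by
    simp [pvEntry, hz, List.getD, ha, hbn]
  rw [hzab]
  simp only [List.getElem_map, List.getElem_range]
  by_cases hab : a = b
  · simp [hab, pvPairs_mem]
  · simp [hab, (pvMem_pairs ha hbn).mpr hab, pvT]
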